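-- pv_equiv track=rewrite | github.com/dangooddd/avito-ds-autumn | src/space_restorator/crf/train.py | text2labels
-- ===== SOURCE A (Python) =====
-- def text2labels(text_with_spaces):
--     """Преобразование текста с пробелами в метки"""
--     labels = []
--     clean_text = text_with_spaces.replace(" ", "")
--
--     j = 0
--     for i, char in enumerate(text_with_spaces):
--         if char != " ":
--             # Пробел после символа?
--             if i < len(text_with_spaces) - 1 and text_with_spaces[i + 1] == " ":
--                 labels.append("SPACE")
--             else:
--                 labels.append("NO_SPACE")
--             j += 1
--
--     return clean_text, labels
-- ===== SOURCE B (Python) =====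
-- def text2labels(text_with_spaces):
--     """Преобразование текста с пробелами в метки"""
--     tokens = text_with_spaces.split(" ")
--     last = len(tokens) - 1
--     labels = []
--     for ti, tok in enumerate(tokens):
--         if not tok:
--             continue
--         labels.extend(["NO_SPACE"] * (len(tok) - 1))
--         labels.append("SPACE" if ti != last else "NO_SPACE")
--     return "".join(tokens), labels
-- ===== Notes on version B (the rewrite author's own statement) =====
-- stated objective: idiomatic
-- what changed: B splits the text on the single-space separator into tokens and emits labels per token in bulk (a replicated NO_SPACE run plus one SPACE at each non-final token boundary), joining the tokens for the clean text, instead of A's flat per-character pass that indexes ahead into the string; the bulk list operations also make it measurably faster by a constant factor.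
import Mathlib
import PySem

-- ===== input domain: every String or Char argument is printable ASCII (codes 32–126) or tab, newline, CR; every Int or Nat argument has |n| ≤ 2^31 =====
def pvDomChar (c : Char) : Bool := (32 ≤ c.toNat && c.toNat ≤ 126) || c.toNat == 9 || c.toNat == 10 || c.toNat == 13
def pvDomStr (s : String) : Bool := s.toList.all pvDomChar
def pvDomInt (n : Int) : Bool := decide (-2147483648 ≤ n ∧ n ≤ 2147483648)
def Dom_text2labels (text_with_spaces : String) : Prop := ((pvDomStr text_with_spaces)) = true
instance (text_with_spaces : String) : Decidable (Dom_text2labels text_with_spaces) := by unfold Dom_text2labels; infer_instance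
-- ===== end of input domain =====

-- B groups the text into tokens (single-space split) and emits labels per token in bulk, instead of A's per-character lookahead pass; same labels, same clean text (idiomatic rewrite; a timing run measured B faster by a constant factor).

-- ===== PORT A =====
def text2labels (text_with_spaces : String) : String × List String :=
  let labels : List String := []
  let clean_text := PySem.Str.replace text_with_spaces " " ""
  let st := (PySem.List.enumerate text_with_spaces.toList 0).foldl
    (fun (a : List String × Int) (p : Int × Char) =>
      if p.2 ≠ ' ' then
        (a.1 ++ [if p.1 < PySem.Str.len text_with_spaces - 1 ∧
                   PySem.Str.pyGet? text_with_spaces (p.1 + 1) = some ' '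
                 then "SPACE" else "NO_SPACE"],
         a.2 + 1)
      else a)
    (labels, 0)
  (clean_text, st.1)

-- ===== PORT B =====
def text2labels_alt (text_with_spaces : String) : String × List String :=
  let tokens := PySem.Chars.splitOn text_with_spaces.toList [' ']
  let last : Int := (tokens.length : Int) - 1
  let labels := (PySem.List.enumerate tokens 0).foldl
    (fun (acc : List String) (p : Int × List Char) =>
      if p.2 = [] then acc
      else acc ++ List.replicate (p.2.length - 1) "NO_SPACE"
               ++ [if p.1 ≠ last then "SPACE" else "NO_SPACE"])
    []
  (String.ofList (PySem.Chars.join [] tokens), labels)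

-- ===== PRECONDITION & SPEC =====
def Spec_text2labels (text_with_spaces : String) (out : String × List String) : Prop := out = text2labels_alt text_with_spaces
instance (text_with_spaces : String) (out : String × List String) : Decidable (Spec_text2labels text_with_spaces out) := by unfold Spec_text2labels; infer_instance

-- ===== CLAIM (what is proved, stated in full; the proofs are below) =====
def Claim_equal_text2labels : Prop := ∀ (text_with_spaces : String), Dom_text2labels text_with_spaces → Spec_text2labels text_with_spaces (text2labels text_with_spaces)

-- ===== LEMMAS AND PROOFS =====

/-- Tokens of a char list, split on a single space (Python's `split(" ")`). -/
def pvSplit1 : List Char → List (List Char)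
  | [] => [[]]
  | c :: t =>
    if c = ' ' then [] :: pvSplit1 t
    else match pvSplit1 t with
      | [] => [[c]]
      | h :: ts => (c :: h) :: ts

/-- Prepend pending characters onto the first token. -/
def pvGlue (p : List Char) : List (List Char) → List (List Char)
  | [] => [p]
  | h :: ts => (p ++ h) :: ts

/-- Reference labelling: one label per non-space char, SPACE iff the next char is a space. -/
def pvG : List Char → List String
  | [] => []
  | c :: rest =>
    if c = ' ' then pvG rest
    else (if rest.head? = some ' ' then "SPACE" else "NO_SPACE") :: pvG rest

lemma pvSplit1_ne_nil (l : List Char) : pvSplit1 l ≠ [] := by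
  cases l with
  | nil => simp [pvSplit1]
  | cons c t =>
    by_cases hc : c = ' ' <;> simp [pvSplit1, hc]
    cases h : pvSplit1 t <;> simp

lemma pvSplit1_cons_sp (t : List Char) : pvSplit1 (' ' :: t) = [] :: pvSplit1 t := by
  simp [pvSplit1]

lemma pvSplit1_cons {c : Char} {t h : List Char} {ts : List (List Char)}
    (hc : c ≠ ' ') (hs : pvSplit1 t = h :: ts) : pvSplit1 (c :: t) = (c :: h) :: ts := by
  simp [pvSplit1, hc, hs]

lemma pv_go_split (l : List Char) : ∀ (fuel : Nat) (cur : List Char) (acc : List (List Char)),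
    l.length ≤ fuel →
    PySem.Chars.splitOn.go [' '] fuel l cur acc = acc.reverse ++ pvGlue cur.reverse (pvSplit1 l) := by
  induction l with
  | nil =>
    intro fuel cur acc _
    cases fuel <;> simp [PySem.Chars.splitOn.go, pvSplit1, pvGlue]
  | cons c t ih =>
    intro fuel cur acc h
    cases fuel with
    | zero => simp at h
    | succ f =>
      by_cases hc : c = ' '
      · subst hc
        rw [show PySem.Chars.splitOn.go [' '] (f+1) (' ' :: t) cur acc
              = PySem.Chars.splitOn.go [' '] f t [] (cur.reverse :: acc) by
            simp [PySem.Chars.splitOn.go, List.isPrefixOf]]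
        rw [ih f [] (cur.reverse :: acc) (by simpa using h)]
        rw [pvSplit1_cons_sp]
        cases hs : pvSplit1 t with
        | nil => exact absurd hs (pvSplit1_ne_nil t)
        | cons h' ts => simp [pvGlue]
      · rw [show PySem.Chars.splitOn.go [' '] (f+1) (c :: t) cur acc
              = PySem.Chars.splitOn.go [' '] f t (c :: cur) acc by
            simp [PySem.Chars.splitOn.go, List.isPrefixOf,
                  (by simpa using Ne.symm hc : (' ' == c) = false)]]
        rw [ih f (c :: cur) acc (by simpa using Nat.le_of_succ_le_succ h)]
        cases hs : pvSplit1 t with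
        | nil => exact absurd hs (pvSplit1_ne_nil t)
        | cons h' ts => rw [pvSplit1_cons hc hs]; simp [pvGlue]

lemma pv_splitOn_eq (cs : List Char) : PySem.Chars.splitOn cs [' '] = pvSplit1 cs := by
  unfold PySem.Chars.splitOn
  rw [pv_go_split cs (cs.length + 1) [] [] (by omega)]
  cases hs : pvSplit1 cs with
  | nil => exact absurd hs (pvSplit1_ne_nil cs)
  | cons h ts => simp [pvGlue]

lemma pv_go_replace (l : List Char) : ∀ (fuel : Nat) (acc : List Char),
    l.length ≤ fuel →
    PySem.Chars.replace.go [' '] [] fuel l acc = acc.reverse ++ l.filter (· ≠ ' ') := by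
  induction l with
  | nil =>
    intro fuel acc _
    cases fuel <;> simp [PySem.Chars.replace.go]
  | cons c t ih =>
    intro fuel acc h
    cases fuel with
    | zero => simp at h
    | succ f =>
      by_cases hc : c = ' '
      · subst hc
        rw [show PySem.Chars.replace.go [' '] [] (f+1) (' ' :: t) acc
              = PySem.Chars.replace.go [' '] [] f t acc by
            simp [PySem.Chars.replace.go, List.isPrefixOf]]
        rw [ih f acc (by simpa using h)]
        simp
      · rw [show PySem.Chars.replace.go [' '] [] (f+1) (c :: t) acc
              = PySem.Chars.replace.go [' '] [] f t (c :: acc) by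
            simp [PySem.Chars.replace.go, List.isPrefixOf,
                  (by simpa using Ne.symm hc : (' ' == c) = false)]]
        rw [ih f (c :: acc) (by simpa using Nat.le_of_succ_le_succ h)]
        simp [hc]

lemma pv_replace_eq (cs : List Char) : PySem.Chars.replace cs [' '] [] = cs.filter (· ≠ ' ') := by
  unfold PySem.Chars.replace
  simp only [List.isEmpty_cons]
  exact pv_go_replace cs cs.length [] (le_refl _)

lemma pv_join0_split1 (cs : List Char) : PySem.Chars.join [] (pvSplit1 cs) = cs.filter (· ≠ ' ') := by
  induction cs with
  | nil => simp [pvSplit1, PySem.Chars.join_singleton]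
  | cons c t ih =>
    by_cases hc : c = ' '
    · subst hc
      rw [pvSplit1_cons_sp]
      cases hs : pvSplit1 t with
      | nil => exact absurd hs (pvSplit1_ne_nil t)
      | cons h ts =>
        rw [hs] at ih
        rw [PySem.Chars.join_cons_cons, List.filter_cons_of_neg (by simp)]
        simpa using ih
    · cases hs : pvSplit1 t with
      | nil => exact absurd hs (pvSplit1_ne_nil t)
      | cons h ts =>
        rw [hs] at ih
        rw [pvSplit1_cons hc hs, List.filter_cons_of_pos (by simpa using hc)]
        cases ts with
        | nil =>
          rw [PySem.Chars.join_singleton] at ih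
          rw [PySem.Chars.join_singleton, ih]
        | cons q ts' =>
          rw [PySem.Chars.join_cons_cons] at ih
          rw [PySem.Chars.join_cons_cons, ← ih]
          simp
lemma pv_joinsp_split1 (cs : List Char) : PySem.Chars.join [' '] (pvSplit1 cs) = cs := by
  induction cs with
  | nil => simp [pvSplit1, PySem.Chars.join_singleton]
  | cons c t ih =>
    by_cases hc : c = ' '
    · subst hc
      rw [pvSplit1_cons_sp]
      cases hs : pvSplit1 t with
      | nil => exact absurd hs (pvSplit1_ne_nil t)
      | cons h ts =>
        rw [hs] at ih
        rw [PySem.Chars.join_cons_cons]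
        simp [ih]
    · cases hs : pvSplit1 t with
      | nil => exact absurd hs (pvSplit1_ne_nil t)
      | cons h ts =>
        rw [hs] at ih
        rw [pvSplit1_cons hc hs]
        cases ts with
        | nil =>
          rw [PySem.Chars.join_singleton] at ih
          rw [PySem.Chars.join_singleton, ih]
        | cons q ts' =>
          rw [PySem.Chars.join_cons_cons] at ih
          rw [PySem.Chars.join_cons_cons, ← ih]
          simp

lemma pv_split1_nospace (cs : List Char) : ∀ t ∈ pvSplit1 cs, ' ' ∉ t := by
  induction cs with
  | nil => simp [pvSplit1]
  | cons c t ih =>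
    by_cases hc : c = ' '
    · subst hc
      rw [pvSplit1_cons_sp]
      intro u hu
      rcases List.mem_cons.mp hu with rfl | hu
      · simp
      · exact ih u hu
    · cases hs : pvSplit1 t with
      | nil => exact absurd hs (pvSplit1_ne_nil t)
      | cons h ts =>
        rw [pvSplit1_cons hc hs]
        intro u hu
        rcases List.mem_cons.mp hu with rfl | hu
        · intro hmem
          rcases List.mem_cons.mp hmem with h1 | h1
          · exact hc h1.symm
          · exact ih h (hs ▸ List.mem_cons_self) h1
        · exact ih u (hs ▸ List.mem_cons_of_mem _ hu)

lemma pvG_sp (w : List Char) : pvG (' ' :: w) = pvG w := by simp [pvG]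

lemma pvG_nospace (t : List Char) (h : ' ' ∉ t) : pvG t = List.replicate t.length "NO_SPACE" := by
  induction t with
  | nil => simp [pvG]
  | cons c r ih =>
    have hc : c ≠ ' ' := by rintro rfl; exact h (by simp)
    have hr : ' ' ∉ r := fun hm => h (by simp [hm])
    have hh : r.head? ≠ some ' ' := by
      cases r with
      | nil => simp
      | cons d r' =>
        have : d ≠ ' ' := by rintro rfl; exact hr (by simp)
        simpa using this
    simp [pvG, hc, hh, ih hr, List.replicate_succ]

lemma pvG_token (t w : List Char) (h : ' ' ∉ t) (hne : t ≠ []) :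
    pvG (t ++ ' ' :: w) = List.replicate (t.length - 1) "NO_SPACE" ++ ["SPACE"] ++ pvG w := by
  induction t with
  | nil => exact absurd rfl hne
  | cons c r ih =>
    have hc : c ≠ ' ' := by rintro rfl; exact h (by simp)
    have hr : ' ' ∉ r := fun hm => h (by simp [hm])
    cases r with
    | nil => simp [pvG, hc]
    | cons d r' =>
      have hd : d ≠ ' ' := by rintro rfl; exact hr (by simp)
      have := ih hr (by simp)
      simp only [List.cons_append, pvG, if_neg hc] at this ⊢
      rw [this]
      simp [hd, List.replicate_succ]

lemma pv_A (S : List Char) : ∀ (R : List Char) (k : Nat) (acc : List String) (j : Int),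
    S.drop k = R →
    ((PySem.List.enumerate R (k : Int)).foldl
      (fun (a : List String × Int) (p : Int × Char) =>
        if p.2 ≠ ' ' then
          (a.1 ++ [if p.1 < (S.length : Int) - 1 ∧
                     PySem.List.pyGet? S (p.1 + 1) = some ' '
                   then "SPACE" else "NO_SPACE"],
           a.2 + 1)
        else a)
      (acc, j)).1 = acc ++ pvG R := by
  intro R
  induction R with
  | nil => intro k acc j _; simp [PySem.List.enumerate, pvG]
  | cons c rest ih =>
    intro k acc j hdrop
    have hlen : S.length = k + rest.length + 1 := by
      have h1 : (S.drop k).length = S.length - k := by simp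
      rw [hdrop] at h1
      have hk : k ≤ S.length := by
        by_contra hk
        have : S.drop k = [] := List.drop_eq_nil_of_le (by omega)
        rw [hdrop] at this; simp at this
      simp at h1; omega
    have hdrop1 : S.drop (k + 1) = rest := by
      have : S.drop (k+1) = (S.drop k).drop 1 := by rw [List.drop_drop]
      rw [this, hdrop]; simp
    have hget : S[k+1]? = rest.head? := by
      rw [← List.head?_drop, hdrop1]
    have hcond : ((k : Int) < (S.length : Int) - 1 ∧
        PySem.List.pyGet? S ((k : Int) + 1) = some ' ') ↔ rest.head? = some ' ' := by
      have hcast : ((k : Int) + 1) = ((k + 1 : Nat) : Int) := by push_cast; ring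
      rw [hcast, PySem.List.pyGet?_natCast, hget]
      constructor
      · exact fun h => h.2
      · intro h
        refine ⟨?_, h⟩
        cases rest with
        | nil => simp at h
        | cons d r' =>
          have h2 : S.length = k + (d :: r').length + 1 := hlen
          simp only [List.length_cons] at h2
          omega
    rw [PySem.List.enumerate_cons]
    simp only [List.foldl_cons]
    by_cases hc : c = ' '
    · subst hc
      rw [if_neg (show ¬ (' ' ≠ ' ') by simp)]
      rw [show ((k : Int) + 1) = ((k + 1 : Nat) : Int) by push_cast; ring]
      rw [ih (k + 1) acc j hdrop1, pvG_sp]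
    · rw [if_pos hc]
      by_cases hsp : rest.head? = some ' '
      · rw [if_pos (hcond.mpr hsp)]
        rw [show ((k : Int) + 1) = ((k + 1 : Nat) : Int) by push_cast; ring]
        rw [ih (k + 1) (acc ++ ["SPACE"]) (j + 1) hdrop1]
        simp [pvG, hc, hsp]
      · rw [if_neg (fun hh => hsp (hcond.mp hh))]
        rw [show ((k : Int) + 1) = ((k + 1 : Nat) : Int) by push_cast; ring]
        rw [ih (k + 1) (acc ++ ["NO_SPACE"]) (j + 1) hdrop1]
        simp [pvG, hc, hsp]

lemma pv_B (L : Int) : ∀ (ts : List (List Char)) (k : Int) (acc : List String),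
    k + ts.length = L → (∀ t ∈ ts, ' ' ∉ t) →
    (PySem.List.enumerate ts k).foldl
      (fun (acc : List String) (p : Int × List Char) =>
        if p.2 = [] then acc
        else acc ++ List.replicate (p.2.length - 1) "NO_SPACE"
                 ++ [if p.1 ≠ L - 1 then "SPACE" else "NO_SPACE"])
      acc = acc ++ pvG (PySem.Chars.join [' '] ts) := by
  intro ts
  induction ts with
  | nil => intro k acc _ _; simp [PySem.List.enumerate, PySem.Chars.join_nil, pvG]
  | cons t rest ih =>
    intro k acc hk hsp
    rw [PySem.List.enumerate_cons]
    simp only [List.foldl_cons]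
    have hspt : ' ' ∉ t := hsp t (by simp)
    cases rest with
    | nil =>
      have hklast : k = L - 1 := by simp at hk; omega
      rw [PySem.Chars.join_singleton]
      by_cases ht : t = []
      · subst ht
        simp [PySem.List.enumerate, pvG]
      · rw [if_neg ht, if_neg (by omega : ¬ k ≠ L - 1)]
        have hlen : t.length - 1 + 1 = t.length := Nat.succ_pred_eq_of_pos (List.length_pos_iff.mpr ht)
        simp only [PySem.List.enumerate, List.foldl_nil]
        rw [pvG_nospace t hspt, ← hlen, List.replicate_succ']
        simp
    | cons u rs =>
      have hkne : k ≠ L - 1 := by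
        simp only [List.length_cons] at hk; push_cast at hk; omega
      have hk1 : (k + 1) + ((u :: rs).length : Int) = L := by
        simp only [List.length_cons] at hk ⊢; push_cast at hk ⊢; omega
      have hsp1 : ∀ v ∈ u :: rs, ' ' ∉ v := fun v hv => hsp v (by simp [hv])
      rw [PySem.Chars.join_cons_cons]
      by_cases ht : t = []
      · subst ht
        rw [if_pos rfl]
        rw [ih (k + 1) acc hk1 hsp1]
        simp [pvG_sp]
      · rw [if_neg ht, if_pos hkne]
        rw [ih (k + 1) (acc ++ List.replicate (t.length - 1) "NO_SPACE" ++ ["SPACE"]) hk1 hsp1]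
        rw [List.append_assoc t, List.singleton_append, pvG_token t _ hspt ht]
        simp

-- ===== VERDICT (by name: the statement is the Claim_ definition above) =====
theorem text2labels_spec : Claim_equal_text2labels := by
  intro s _
  simp only [Spec_text2labels, text2labels, text2labels_alt]
  apply Prod.ext
  · apply String.toList_inj.mp
    rw [PySem.Str.toList_replace, String.toList_ofList]
    simp only [show ("" : String).toList = [] by decide]
    rw [pv_replace_eq, pv_splitOn_eq, pv_join0_split1]
    exact String.toList_ofList.symm
  · have hA := pv_A s.toList s.toList 0 [] 0 (by simp)
    have hB := pv_B ((pvSplit1 s.toList).length : Int) (pvSplit1 s.toList) 0 []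
      (by simp) (pv_split1_nospace s.toList)
    simp only [Nat.cast_zero] at hA hB
    simp only [PySem.Str.pyGet?_eq, PySem.Chars.pyGet?_eq_listPyGet?, PySem.Str.len_eq,
      pv_splitOn_eq]
    rw [List.nil_append] at hA hB
    rw [pv_joinsp_split1] at hB
    exact hA.trans hB.symm
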